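-- pv_equiv track=rewrite | github.com/YiqunPeng/Leetcode-pyq | solutions/861ScoreAfterFlippingMatrix.py | matrixScore
-- ===== SOURCE A (Python) =====
-- def matrixScore(A):
--     """
--     :type A: List[List[int]]
--     :rtype: int
--     """
--     for i in range(len(A)):
--         if A[i][0] == 0:
--             for j in range(len(A[0])):
--                 A[i][j] = 1 - A[i][j]
--
--     for j in range(len(A[0])):
--         cnt = 0
--         for i in range(len(A)):
--             if A[i][j] == 0:
--                 cnt += 1
--         if len(A) - cnt < cnt:
--             for i in range(len(A)):
--                 A[i][j] = 1 - A[i][j]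
--
--     ans = 0
--     for i in range(len(A)):
--         for j in range(len(A[0])):
--             ans += A[i][j] * 2 ** (len(A[0]) - 1 - j)
--     return ans
-- ===== SOURCE B (Python) =====
-- def matrixScore(A):
--     """
--     :type A: List[List[int]]
--     :rtype: int
--     """
--     m, n = len(A), len(A[0])
--     zeros = [0] * n
--     ssum = [0] * n
--     flipped = 0
--     for row in A:
--         if row[0] == 0:
--             flipped += 1
--             zeros = [z + (1 if x == 1 else 0) for z, x in zip(zeros, row)]
--             ssum = [s - x for s, x in zip(ssum, row)]
--         else:
--             zeros = [z + (1 if x == 0 else 0) for z, x in zip(zeros, row)]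
--             ssum = [s + x for s, x in zip(ssum, row)]
--     ans = 0
--     for j in range(n):
--         s = flipped + ssum[j]
--         if m - zeros[j] < zeros[j]:
--             s = m - s
--         ans += s * 2 ** (n - 1 - j)
--     return ans
-- ===== Notes on version B (the rewrite author's own statement) =====
-- stated objective: faster
-- what changed: B never flips anything and makes one row-major pass: each row's complementation is folded into a sign and a global flipped-row counter while per-column zero-counts and signed sums are accumulated, then a closed-form combine per column yields the score; A makes three staged passes (row flips, column-count with in-place column flips, then a separate scoring double loop) mutating the matrix, and B's single pass without any element rewriting is measurably faster by a constant factor.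
import Mathlib
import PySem

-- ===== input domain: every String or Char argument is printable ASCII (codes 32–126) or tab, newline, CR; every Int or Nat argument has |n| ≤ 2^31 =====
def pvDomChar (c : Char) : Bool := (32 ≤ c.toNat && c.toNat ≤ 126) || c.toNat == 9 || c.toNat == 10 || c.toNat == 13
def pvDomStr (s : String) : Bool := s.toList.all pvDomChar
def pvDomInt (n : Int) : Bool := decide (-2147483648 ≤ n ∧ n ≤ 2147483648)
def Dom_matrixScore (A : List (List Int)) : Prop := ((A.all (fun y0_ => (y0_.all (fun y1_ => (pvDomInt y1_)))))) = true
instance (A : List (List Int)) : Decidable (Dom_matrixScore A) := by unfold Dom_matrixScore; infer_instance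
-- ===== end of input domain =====

-- B makes one row-major pass accumulating per-column zero-counts and signed sums (no flips, no
-- mutation) and combines them in closed form; A makes three mutating passes.
-- Note: the Python A mutates its argument in place; B does not — the equivalence proved here is
-- about the RETURN value.

-- ===== PORT A =====
-- Literal port of A's three passes. Indices produced by the range loops are nonnegative and,
-- under Pre_matrixScore, in range, so Python's xs[j] is ported as List.getD j 0 (exact on Pre_).
def matrixScore (A : List (List Int)) : Int :=
  let n := A.headI.length
  -- first loop: flip the first n entries of row i iff its leading entry is 0
  let A1 := A.map (fun row =>
    if row.getD 0 0 = 0 then row.mapIdx (fun j x => if j < n then 1 - x else x) else row)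
  -- second loop: for each column j, count zeros; flip the column iff len(A) - cnt < cnt
  let A2 := (List.range n).foldl (fun M j =>
    let cnt : Int := M.foldl (fun c row => if row.getD j 0 = 0 then c + 1 else c) 0
    if (M.length : Int) - cnt < cnt then
      M.map (fun row => row.mapIdx (fun k x => if k = j then 1 - x else x))
    else M) A1
  -- third loop: score the mutated matrix row by row
  A2.foldl (fun ans row =>
    (List.range n).foldl (fun a j => a + row.getD j 0 * (2:Int) ^ (n - 1 - j)) ans) 0

-- ===== PORT B =====
-- Literal port of Source B's row loop body: the zip comprehensions become zipWith.
def pvBStep (st : List Int × List Int × Int) (row : List Int) : List Int × List Int × Int :=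
  if row.getD 0 0 = 0 then
    (List.zipWith (fun z x => z + if x = 1 then 1 else 0) st.1 row,
     List.zipWith (fun s x => s - x) st.2.1 row,
     st.2.2 + 1)
  else
    (List.zipWith (fun z x => z + if x = 0 then 1 else 0) st.1 row,
     List.zipWith (fun s x => s + x) st.2.1 row,
     st.2.2)

-- Literal port of Source B: one pass over the rows building (zeros, ssum, flipped), then the
-- closed-form combine per column.
def matrixScore_alt (A : List (List Int)) : Int :=
  let m := A.length
  let n := A.headI.length
  let st := A.foldl pvBStep (List.replicate n 0, List.replicate n 0, 0)
  (List.range n).foldl (fun ans j =>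
    let s := st.2.2 + st.2.1.getD j 0
    let s' := if (m : Int) - st.1.getD j 0 < st.1.getD j 0 then (m : Int) - s else s
    ans + s' * (2:Int) ^ (n - 1 - j)) 0

-- ===== PRECONDITION & SPEC =====
-- Exactly the inputs on which the Python A returns: A nonempty, its first row nonempty, and every
-- row at least as long as the first (otherwise A raises IndexError).
def Pre_matrixScore (A : List (List Int)) : Prop :=
  A ≠ [] ∧ 0 < A.headI.length ∧ ∀ row ∈ A, A.headI.length ≤ row.length
instance (A : List (List Int)) : Decidable (Pre_matrixScore A) := by
  unfold Pre_matrixScore; infer_instance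
def pvWitness_matrixScore : List (List Int) := [[0, 1], [1, 0]]

def Spec_matrixScore (A : List (List Int)) (out : Int) : Prop := out = matrixScore_alt A
instance (A : List (List Int)) (out : Int) : Decidable (Spec_matrixScore A out) := by
  unfold Spec_matrixScore; infer_instance

-- ===== CLAIM (what is proved, stated in full; the proofs are below) =====
def Claim_equal_matrixScore : Prop :=
  ∀ (A : List (List Int)), Dom_matrixScore A → Pre_matrixScore A →
    Spec_matrixScore A (matrixScore A)

-- ===== LEMMAS AND PROOFS =====

-- column j of a matrix, as both programs read it
def pvCol (M : List (List Int)) (j : Nat) : List Int := M.map (fun row => row.getD j 0)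

-- the full-row normalization B's arithmetic corresponds to
def pvNorm (row : List Int) : List Int :=
  if row.getD 0 0 = 0 then row.map (fun x => 1 - x) else row

-- the column flip of A's second loop
def pvFlipC (j : Nat) (M : List (List Int)) : List (List Int) :=
  M.map (fun row => row.mapIdx (fun k x => if k = j then 1 - x else x))

-- the body of A's second loop
def pvStep (M : List (List Int)) (j : Nat) : List (List Int) :=
  let cnt : Int := M.foldl (fun c row => if row.getD j 0 = 0 then c + 1 else c) 0
  if (M.length : Int) - cnt < cnt then pvFlipC j M else M

-- A's zero-counting inner loop is the zero count of the column
theorem pvCnt_eq (M : List (List Int)) (j : Nat) (c : Int) :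
    M.foldl (fun c row => if row.getD j 0 = 0 then c + 1 else c) c
      = c + ((pvCol M j).count 0 : Int) := by
  induction M generalizing c with
  | nil => simp [pvCol]
  | cons r M ih =>
    rw [List.foldl_cons, ih]
    show _ = c + ((List.count 0 (r.getD j 0 :: pvCol M j) : Nat) : Int)
    rw [List.count_cons]
    by_cases h : r.getD j 0 = 0
    · have hb : (r.getD j 0 == 0) = true := beq_iff_eq.mpr h
      rw [if_pos h, hb]
      simp
      ring
    · have hb : (r.getD j 0 == 0) = false := beq_eq_false_iff_ne.mpr h
      rw [if_neg h, hb]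
      simp

theorem pvStep_eq (M : List (List Int)) (j : Nat) :
    pvStep M j =
      if (M.length : Int) - ((pvCol M j).count 0 : Int) < ((pvCol M j).count 0 : Int)
      then pvFlipC j M else M := by
  unfold pvStep
  rw [pvCnt_eq]
  simp

theorem pvCol_flipC_ne {j j' : Nat} (h : j ≠ j') (M : List (List Int)) :
    pvCol (pvFlipC j' M) j = pvCol M j := by
  unfold pvCol pvFlipC
  rw [List.map_map]
  refine List.map_congr_left (fun row _ => ?_)
  simp only [Function.comp, List.getD_eq_getElem?_getD, List.getElem?_mapIdx]
  cases hrow : row[j]? with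
  | none => simp
  | some x => simp [h]

theorem pvCol_flipC_self {j : Nat} (M : List (List Int))
    (h : ∀ row ∈ M, j < row.length) :
    pvCol (pvFlipC j M) j = (pvCol M j).map (fun x => 1 - x) := by
  unfold pvCol pvFlipC
  rw [List.map_map, List.map_map]
  refine List.map_congr_left (fun row hm => ?_)
  have hj := h row hm
  simp [Function.comp, List.getD_eq_getElem?_getD, List.getElem?_mapIdx,
    List.getElem?_eq_getElem hj]

theorem pvStep_length (M : List (List Int)) (j : Nat) :
    (pvStep M j).length = M.length := by
  rw [pvStep_eq]; split <;> simp [pvFlipC]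

theorem pvStep_rowlen {n : Nat} (M : List (List Int)) (j : Nat)
    (h : ∀ row ∈ M, n ≤ row.length) :
    ∀ row ∈ pvStep M j, n ≤ row.length := by
  rw [pvStep_eq]; split
  · intro row hr
    simp only [pvFlipC, List.mem_map] at hr
    obtain ⟨r, hrM, rfl⟩ := hr
    simpa using h r hrM
  · exact h

theorem pvCol_step_ne {j a : Nat} (h : j ≠ a) (M : List (List Int)) :
    pvCol (pvStep M a) j = pvCol M j := by
  rw [pvStep_eq]; split
  · exact pvCol_flipC_ne h M
  · rfl

theorem pvFold_col_notmem (L : List Nat) (M : List (List Int)) {j : Nat}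
    (hj : j ∉ L) : pvCol (L.foldl pvStep M) j = pvCol M j := by
  induction L generalizing M with
  | nil => rfl
  | cons a L ih =>
    simp only [List.mem_cons, not_or] at hj
    rw [List.foldl_cons, ih _ hj.2, pvStep_eq]
    split
    · exact pvCol_flipC_ne hj.1 M
    · rfl

theorem pvFold_col_mem {n : Nat} (L : List Nat) (M : List (List Int))
    (hrow : ∀ row ∈ M, n ≤ row.length) (hnd : L.Nodup) {j : Nat}
    (hjL : j ∈ L) (hjn : j < n) :
    pvCol (L.foldl pvStep M) j =
      if (M.length : Int) - ((pvCol M j).count 0 : Int) < ((pvCol M j).count 0 : Int)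
      then (pvCol M j).map (fun x => 1 - x) else pvCol M j := by
  induction L generalizing M with
  | nil => cases hjL
  | cons a L ih =>
    rw [List.foldl_cons]
    rcases List.mem_cons.mp hjL with rfl | hjL'
    · have haL : j ∉ L := (List.nodup_cons.mp hnd).1
      rw [pvFold_col_notmem L _ haL, pvStep_eq]
      split
      · exact pvCol_flipC_self M (fun row hr => lt_of_lt_of_le hjn (hrow row hr))
      · rfl
    · by_cases hja : j = a
      · subst hja
        exact absurd hjL' (List.nodup_cons.mp hnd).1
      · rw [ih _ (pvStep_rowlen M a hrow) (List.nodup_cons.mp hnd).2 hjL',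
          pvStep_length, pvCol_step_ne hja _]

theorem pvSum_map_one_sub (l : List Int) :
    (l.map (fun x => 1 - x)).sum = (l.length : Int) - l.sum := by
  induction l with
  | nil => simp
  | cons x l ih =>
    rw [List.map_cons, List.sum_cons, ih, List.sum_cons, List.length_cons]
    push_cast
    ring

theorem pvSum_mul (l : List Int) (w : Int) :
    (l.map (fun x => x * w)).sum = l.sum * w := by
  induction l with
  | nil => simp
  | cons x l ih => simp [ih]; ring

theorem pvSum_swap (M : List (List Int)) (L : List Nat) (g : List Int → Nat → Int) :
    (M.map (fun row => (L.map (g row)).sum)).sum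
      = (L.map (fun j => (M.map (fun row => g row j)).sum)).sum := by
  induction M with
  | nil => simp
  | cons r M ih =>
    simp only [List.map_cons, List.sum_cons, ih, PySem.List.sum_map_add_int]

theorem pvScoreA (M : List (List Int)) (n : Nat) :
    M.foldl (fun ans row =>
        (List.range n).foldl (fun a j => a + row.getD j 0 * (2:Int) ^ (n - 1 - j)) ans) 0
      = ((List.range n).map (fun j => (pvCol M j).sum * (2:Int) ^ (n - 1 - j))).sum := by
  simp only [PySem.List.foldl_add]
  rw [pvSum_swap M (List.range n) (fun row j => row.getD j 0 * (2:Int) ^ (n - 1 - j))]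
  simp only [zero_add]
  refine congrArg List.sum (List.map_congr_left fun j _ => ?_)
  rw [← pvSum_mul (pvCol M j) ((2:Int) ^ (n - 1 - j)), pvCol, List.map_map]
  rfl

-- reading index j of a zipWith when j is in range of both lists
theorem pvGetD_zipWith (f : Int → Int → Int) (a b : List Int) (j : Nat)
    (ha : j < a.length) (hb : j < b.length) :
    (List.zipWith f a b).getD j 0 = f (a.getD j 0) (b.getD j 0) := by
  have hl : j < (List.zipWith f a b).length := by
    rw [List.length_zipWith]; omega
  rw [List.getD_eq_getElem _ _ hl, List.getD_eq_getElem _ _ ha, List.getD_eq_getElem _ _ hb,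
    List.getElem_zipWith]

-- the invariant of B's single row pass: zeros holds per-column zero counts of the normalized
-- matrix seen so far, and flipped + ssum[j] its column sums
theorem pvBfold_spec (R : List (List Int)) (n : Nat) (hR : ∀ row ∈ R, n ≤ row.length)
    (z s : List Int) (f : Int) (hz : z.length = n) (hs : s.length = n) :
    ((R.foldl pvBStep (z, s, f)).1.length = n) ∧
    ((R.foldl pvBStep (z, s, f)).2.1.length = n) ∧
    ∀ j, j < n →
      (R.foldl pvBStep (z, s, f)).1.getD j 0
        = z.getD j 0 + ((pvCol (R.map pvNorm) j).count 0 : Int) ∧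
      (R.foldl pvBStep (z, s, f)).2.2 + (R.foldl pvBStep (z, s, f)).2.1.getD j 0
        = f + s.getD j 0 + (pvCol (R.map pvNorm) j).sum := by
  induction R generalizing z s f with
  | nil =>
    refine ⟨hz, hs, fun j hj => ?_⟩
    simp [pvCol]
  | cons r R ih =>
    have hrlen : n ≤ r.length := hR r (by simp)
    have hR' : ∀ row ∈ R, n ≤ row.length := fun row hr => hR row (by simp [hr])
    rw [List.foldl_cons]
    by_cases h0 : r.getD 0 0 = 0
    · have hstep : pvBStep (z, s, f) r =
        (List.zipWith (fun z x => z + if x = 1 then 1 else 0) z r,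
         List.zipWith (fun s x => s - x) s r, f + 1) := by
        unfold pvBStep
        rw [if_pos h0]
      rw [hstep]
      have hz' : (List.zipWith (fun z x => z + if x = 1 then 1 else 0) z r).length = n := by
        rw [List.length_zipWith]; omega
      have hs' : (List.zipWith (fun s x => s - x) s r).length = n := by
        rw [List.length_zipWith]; omega
      obtain ⟨l1, l2, hmain⟩ := ih hR' _ _ (f + 1) hz' hs'
      refine ⟨l1, l2, fun j hj => ?_⟩
      obtain ⟨hcnt, hsum⟩ := hmain j hj
      have hja : j < z.length := by omega
      have hjs : j < s.length := by omega
      have hjr : j < r.length := by omega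
      have hcol : pvCol ((r :: R).map pvNorm) j
          = (1 - r.getD j 0) :: pvCol (R.map pvNorm) j := by
        rw [List.map_cons]
        show (pvNorm r).getD j 0 :: pvCol (R.map pvNorm) j = _
        rw [pvNorm, if_pos h0]
        congr 1
        simp [List.getD_eq_getElem?_getD, List.getElem?_eq_getElem hjr]
      constructor
      · rw [hcnt, pvGetD_zipWith _ _ _ _ hja hjr, hcol, List.count_cons]
        by_cases h1 : r.getD j 0 = 1
        · have hb : ((1:Int) - r.getD j 0 == 0) = true := by
            rw [beq_iff_eq]; omega
          rw [hb, if_pos h1]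
          push_cast
          simp
          omega
        · have hb : ((1:Int) - r.getD j 0 == 0) = false := by
            rw [beq_eq_false_iff_ne]; omega
          rw [hb, if_neg h1]
          push_cast
          simp
      · rw [hsum, pvGetD_zipWith _ _ _ _ hjs hjr, hcol, List.sum_cons]
        ring
    · have hstep : pvBStep (z, s, f) r =
        (List.zipWith (fun z x => z + if x = 0 then 1 else 0) z r,
         List.zipWith (fun s x => s + x) s r, f) := by
        unfold pvBStep
        rw [if_neg h0]
      rw [hstep]
      have hz' : (List.zipWith (fun z x => z + if x = 0 then 1 else 0) z r).length = n := by
        rw [List.length_zipWith]; omega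
      have hs' : (List.zipWith (fun s x => s + x) s r).length = n := by
        rw [List.length_zipWith]; omega
      obtain ⟨l1, l2, hmain⟩ := ih hR' _ _ f hz' hs'
      refine ⟨l1, l2, fun j hj => ?_⟩
      obtain ⟨hcnt, hsum⟩ := hmain j hj
      have hja : j < z.length := by omega
      have hjs : j < s.length := by omega
      have hjr : j < r.length := by omega
      have hcol : pvCol ((r :: R).map pvNorm) j
          = r.getD j 0 :: pvCol (R.map pvNorm) j := by
        rw [List.map_cons]
        show (pvNorm r).getD j 0 :: pvCol (R.map pvNorm) j = _
        rw [pvNorm, if_neg h0]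
      constructor
      · rw [hcnt, pvGetD_zipWith _ _ _ _ hja hjr, hcol, List.count_cons]
        by_cases h1 : r.getD j 0 = 0
        · have hb : (r.getD j 0 == (0:Int)) = true := beq_iff_eq.mpr h1
          rw [hb, if_pos h1]
          push_cast
          simp
          omega
        · have hb : (r.getD j 0 == (0:Int)) = false := beq_eq_false_iff_ne.mpr h1
          rw [hb, if_neg h1]
          push_cast
          simp
      · rw [hsum, pvGetD_zipWith _ _ _ _ hjs hjr, hcol, List.sum_cons]
        ring

theorem pvMain (A : List (List Int))
    (hlen : ∀ row ∈ A, A.headI.length ≤ row.length) :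
    matrixScore A = matrixScore_alt A := by
  set n := A.headI.length with hn
  set m := A.length with hm
  set A1 := A.map (fun row =>
    if row.getD 0 0 = 0 then row.mapIdx (fun j x => if j < n then 1 - x else x) else row) with hA1
  have hA1len : ∀ row ∈ A1, n ≤ row.length := by
    intro row hr
    rw [hA1] at hr
    simp only [List.mem_map] at hr
    obtain ⟨r, hrA, rfl⟩ := hr
    split <;> simp [hlen r hrA]
  have hA1m : A1.length = m := by simp [hA1, hm]
  -- column j of the A-side normalized matrix = column j of the B-side normalized matrix
  have hcol : ∀ j, j < n → pvCol (A.map pvNorm) j = pvCol A1 j := by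
    intro j hj
    rw [hA1]
    unfold pvCol pvNorm
    rw [List.map_map, List.map_map]
    refine List.map_congr_left fun row hr => ?_
    have hjr : j < row.length := lt_of_lt_of_le hj (hlen row hr)
    simp only [Function.comp]
    split
    · simp [List.getD_eq_getElem?_getD, List.getElem?_map,
        List.getElem?_mapIdx, List.getElem?_eq_getElem hjr, hj]
    · rfl
  have hA : matrixScore A =
      ((List.range n).map (fun j =>
        (pvCol ((List.range n).foldl pvStep A1) j).sum * (2:Int) ^ (n - 1 - j))).sum := by
    rw [show matrixScore A = ((List.range n).foldl pvStep A1).foldl (fun ans row =>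
      (List.range n).foldl (fun a j => a + row.getD j 0 * (2:Int) ^ (n - 1 - j)) ans) 0 from rfl]
    exact pvScoreA _ n
  have hrep : ∀ k : Nat, (List.replicate n (0:Int)).getD k 0 = 0 := by
    intro k
    rw [List.getD_eq_getElem?_getD]
    cases h : (List.replicate n (0:Int))[k]? with
    | none => rfl
    | some x =>
      have hx := List.mem_replicate.mp (List.mem_of_getElem? h)
      simp [hx.2]
  obtain ⟨-, -, hinv⟩ := pvBfold_spec A n hlen (List.replicate n 0) (List.replicate n 0) 0
    (List.length_replicate) (List.length_replicate)
  set st := A.foldl pvBStep (List.replicate n 0, List.replicate n 0, 0) with hst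
  have hB : matrixScore_alt A = ((List.range n).map (fun j =>
      (if (m:Int) - st.1.getD j 0 < st.1.getD j 0
       then (m:Int) - (st.2.2 + st.2.1.getD j 0) else st.2.2 + st.2.1.getD j 0)
        * (2:Int) ^ (n - 1 - j))).sum := by
    rw [show matrixScore_alt A = (List.range n).foldl (fun ans j => ans +
      (if (m:Int) - st.1.getD j 0 < st.1.getD j 0
       then (m:Int) - (st.2.2 + st.2.1.getD j 0) else st.2.2 + st.2.1.getD j 0)
        * (2:Int) ^ (n - 1 - j)) 0 from rfl]
    rw [PySem.List.foldl_add]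
    simp
  rw [hA, hB]
  refine congrArg List.sum (List.map_congr_left fun j hj => ?_)
  have hjn : j < n := List.mem_range.mp hj
  obtain ⟨hcnt, hsum⟩ := hinv j hjn
  rw [hrep j, zero_add] at hcnt
  have hsum' : st.2.2 + st.2.1.getD j 0 = (pvCol (A.map pvNorm) j).sum := by
    rw [hsum, hrep j]; ring
  rw [pvFold_col_mem (List.range n) A1 hA1len List.nodup_range hj hjn, hA1m, ← hcol j hjn,
    hcnt, hsum']
  by_cases hc : (m:Int) - ((pvCol (A.map pvNorm) j).count 0 : Int)
      < ((pvCol (A.map pvNorm) j).count 0 : Int)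
  · rw [if_pos hc, if_pos hc, pvSum_map_one_sub]
    have hl : ((pvCol (A.map pvNorm) j).length : Int) = (m : Int) := by
      rw [pvCol, List.length_map, List.length_map, hm]
    rw [hl]
  · rw [if_neg hc, if_neg hc]

-- ===== VERDICT (by name: the statement is the Claim_ definition above) =====
theorem matrixScore_spec : Claim_equal_matrixScore := by
  intro A _ hpre
  exact pvMain A hpre.2.2
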